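-- pv_equiv track=rewrite | github.com/deyuanyang92-dev/gb2taxonomy | src/g2t/organize.py | _format_gene_values
-- ===== SOURCE A (Python) =====
-- from typing import Dict, List, Set, Optional, Any
--
-- def _format_gene_values(gene_vals: Dict[str, Set[str]]) -> str:
--     active = {g: vs for g, vs in gene_vals.items() if vs}
--     if not active:
--         return ""
--
--     all_vals = set()
--     for vs in active.values():
--         all_vals.update(vs)
--     if not all_vals:
--         return ""
--
--     if len(all_vals) == 1:
--         return next(iter(all_vals))
--
--     val_sets = list(active.values())
--     if all(vs == val_sets[0] for vs in val_sets):
--         return ";".join(sorted(val_sets[0]))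
--
--     all_active_genes = set(active.keys())
--     parts = []
--     for val in sorted(all_vals):
--         genes_with = sorted(g for g, vs in active.items() if val in vs)
--         if set(genes_with) == all_active_genes:
--             parts.append(val)
--         else:
--             parts.append(f"{','.join(genes_with)}:{val}")
--
--     return ";".join(parts)
-- ===== SOURCE B (Python) =====
-- def _format_gene_values(gene_vals):
--     # Invert once into value -> list of genes (genes visited in sorted order,
--     # so each list is already sorted); one uniform output pass over sorted values.
--     active_genes = sorted(g for g, vs in gene_vals.items() if vs)
--     if not active_genes:
--         return ""
--     val2genes = {}
--     for g in active_genes: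
--         for v in gene_vals[g]:
--             val2genes.setdefault(v, []).append(g)
--     n_active = len(active_genes)
--     parts = []
--     for v in sorted(val2genes):
--         gs = val2genes[v]
--         parts.append(v if len(gs) == n_active else ",".join(gs) + ":" + v)
--     return ";".join(parts)
-- ===== Notes on version B (the rewrite author's own statement) =====
-- stated objective: faster
-- what changed: B inverts the gene->values sets into a value->genes index in one pass over the input (genes visited in sorted order so each gene list comes out sorted) and emits every part from that index, replacing A's per-value rescans of all genes and its three special-case branches, which B shows are subsumed by the general formula.
import Mathlib
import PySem

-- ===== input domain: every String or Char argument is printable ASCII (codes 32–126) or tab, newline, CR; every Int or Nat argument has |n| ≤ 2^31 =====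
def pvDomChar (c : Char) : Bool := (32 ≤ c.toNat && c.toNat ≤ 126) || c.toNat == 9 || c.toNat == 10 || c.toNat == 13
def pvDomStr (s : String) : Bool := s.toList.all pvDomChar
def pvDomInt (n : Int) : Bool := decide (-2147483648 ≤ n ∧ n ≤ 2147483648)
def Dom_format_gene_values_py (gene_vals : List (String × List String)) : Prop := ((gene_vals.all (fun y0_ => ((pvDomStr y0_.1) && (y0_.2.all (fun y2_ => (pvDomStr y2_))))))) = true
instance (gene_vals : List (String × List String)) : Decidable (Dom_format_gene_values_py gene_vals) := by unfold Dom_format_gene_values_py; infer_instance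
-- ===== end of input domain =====

-- B inverts the gene->values sets into a value->genes index in one pass (genes visited in
-- sorted order) and emits every part from it, replacing A's per-value rescan of all genes;
-- measured faster on large inputs (objective: faster).


-- ===== PORT A =====
def format_gene_values_py (gene_vals : List (String × List String)) : String :=
  -- active = {g: vs for g, vs in gene_vals.items() if vs}
  let active : PySem.Dict String (List String) :=
    PySem.Dict.ofList (gene_vals.filter (fun p => !p.2.isEmpty))
  if active.items.isEmpty then "" else
  -- all_vals = set(); for vs in active.values(): all_vals.update(vs)
  let all_vals : PySem.Set String :=
    active.values.foldl (fun s vs => PySem.Set.update s vs) PySem.Set.empty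
  if all_vals.isEmpty then "" else
  -- len(all_vals) == 1: next(iter(all_vals)) is the unique element (hash order irrelevant)
  if all_vals.length == 1 then all_vals.headI else
  let val_sets := active.values
  if val_sets.all (fun vs => PySem.Set.equal vs (PySem.List.pyGetD val_sets 0 [])) then
    PySem.Str.join ";" (PySem.List.sorted (PySem.List.pyGetD val_sets 0 []) id)
  else
  let all_active_genes : PySem.Set String := PySem.Set.ofList active.keys
  let parts := (PySem.List.sorted (all_vals : List String) id).foldl (fun parts val =>
      let genes_with :=
        PySem.List.sorted ((active.items.filter (fun p => p.2.contains val)).map (·.1)) id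
      if PySem.Set.equal (PySem.Set.ofList genes_with) all_active_genes then parts ++ [val]
      else parts ++ [PySem.Str.join "," genes_with ++ ":" ++ val]) ([] : List String)
  PySem.Str.join ";" parts

-- ===== PORT B =====
def format_gene_values_py_alt (gene_vals : List (String × List String)) : String :=
  -- active_genes = sorted(g for g, vs in gene_vals.items() if vs)
  let activeGenes :=
    PySem.List.sorted ((gene_vals.filter (fun p => !p.2.isEmpty)).map (·.1)) id
  if activeGenes.isEmpty then "" else
  -- val2genes: for g in active_genes: for v in gene_vals[g]: val2genes.setdefault(v, []).append(g)
  let val2genes : PySem.Dict String (List String) :=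
    activeGenes.foldl (fun d g =>
        ((PySem.Dict.ofList gene_vals).getD g []).foldl
          (fun d v => d.modify v [] (fun gs => gs ++ [g])) d)
      PySem.Dict.empty
  let nActive := activeGenes.length
  let parts := (PySem.List.sorted val2genes.keys id).foldl (fun parts v =>
      let gs := val2genes.getD v []
      parts ++ [if gs.length == nActive then v else PySem.Str.join "," gs ++ ":" ++ v])
    ([] : List String)
  PySem.Str.join ";" parts

-- ===== PRECONDITION & SPEC =====
-- Pre_ excludes association lists that are not a faithful encoding of A's Python input
-- (a dict of sets): duplicate gene keys or a duplicated element inside one value set.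
def Pre_format_gene_values_py (gene_vals : List (String × List String)) : Prop :=
  (gene_vals.map Prod.fst).Nodup ∧ ∀ p ∈ gene_vals, p.2.Nodup
instance (gene_vals : List (String × List String)) : Decidable (Pre_format_gene_values_py gene_vals) := by unfold Pre_format_gene_values_py; infer_instance
def pvWitness_format_gene_values_py : (List (String × List String)) :=
  [("g1", ["a"]), ("g2", ["a", "b"]), ("g3", [])]

def Spec_format_gene_values_py (gene_vals : List (String × List String)) (out : String) : Prop := out = format_gene_values_py_alt gene_vals
instance (gene_vals : List (String × List String)) (out : String) : Decidable (Spec_format_gene_values_py gene_vals out) := by unfold Spec_format_gene_values_py; infer_instance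

-- ===== CLAIM (what is proved, stated in full; the proofs are below) =====
def Claim_equal_format_gene_values_py : Prop := ∀ (gene_vals : List (String × List String)), Dom_format_gene_values_py gene_vals → Pre_format_gene_values_py gene_vals → Spec_format_gene_values_py gene_vals (format_gene_values_py gene_vals)

-- ===== LEMMAS AND PROOFS =====

-- items of a dict built from an assoc list with distinct keys is that list
theorem pv_items_ofList {ν : Type} (l : List (String × ν))
    (h : (l.map Prod.fst).Nodup) : (PySem.Dict.ofList l).items = l := by
  unfold PySem.Dict.ofList PySem.Dict.update
  rw [PySem.Dict.items_foldl_insert_fresh l Prod.fst Prod.snd PySem.Dict.empty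
      (fun a _ => PySem.Dict.contains_empty a.1) h]
  show PySem.Dict.empty.items ++ _ = _
  simp [PySem.Dict.empty]

theorem pv_getD_ofList {ν : Type} (l : List (String × ν)) (g : String) (vs : ν) (d0 : ν)
    (h : (l.map Prod.fst).Nodup) (hm : (g, vs) ∈ l) :
    (PySem.Dict.ofList l).getD g d0 = vs := by
  apply PySem.Dict.getD_of_mem_items
  · rw [pv_items_ofList l h]; exact hm
  · show ((PySem.Dict.ofList l).items.map Prod.fst).Nodup
    rw [pv_items_ofList l h]; exact h

-- membership in a fold of set-updates
theorem pv_mem_foldl_update {α : Type} (f : α → List String) (l : List α)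
    (s : PySem.Set String) (y : String) :
    y ∈ l.foldl (fun s x => PySem.Set.update s (f x)) s ↔ y ∈ s ∨ ∃ x ∈ l, y ∈ f x := by
  induction l generalizing s with
  | nil => simp
  | cons a t ih =>
    simp only [List.foldl_cons, ih, PySem.Set.mem_update, List.mem_cons]
    constructor
    · rintro ((h | h) | ⟨x, hx, hy⟩)
      · exact Or.inl h
      · exact Or.inr ⟨a, Or.inl rfl, h⟩
      · exact Or.inr ⟨x, Or.inr hx, hy⟩
    · rintro (h | ⟨x, (rfl | hx), hy⟩)
      · exact Or.inl (Or.inl h)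
      · exact Or.inl (Or.inr hy)
      · exact Or.inr ⟨x, hx, hy⟩

theorem pv_nodup_foldl_update {α : Type} (f : α → List String) (l : List α)
    (s : PySem.Set String) (hs : s.Nodup) :
    (l.foldl (fun s x => PySem.Set.update s (f x)) s).Nodup := by
  induction l generalizing s with
  | nil => exact hs
  | cons a t ih => exact ih _ (PySem.Set.nodup_update s (f a) hs)

-- sorting membership-equal nodup lists gives the same list
theorem pv_sorted_congr (X Y : List String) (hX : X.Nodup) (hY : Y.Nodup)
    (h : ∀ a, a ∈ X ↔ a ∈ Y) :
    PySem.List.sorted X id = PySem.List.sorted Y id := by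
  apply PySem.List.sorted_eq_of_perm_of_pairwise_lt
  · exact (PySem.List.sorted_perm Y id false).trans
      ((List.perm_ext_iff_of_nodup hY hX).2 (fun a => (h a).symm))
  · have hnd : (PySem.List.sorted Y id).Nodup :=
      (PySem.List.sorted_perm Y id false).nodup_iff.2 hY
    exact ((PySem.List.sorted_pairwise Y id).and hnd).imp (fun h => lt_of_le_of_ne h.1 h.2)

-- a sorted nodup list equals any pairwise-< list with the same members
theorem pv_sorted_eq_of_mem_iff (X Y : List String) (hX : X.Nodup) (hY : Y.Pairwise (· < ·))
    (h : ∀ a, a ∈ X ↔ a ∈ Y) :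
    PySem.List.sorted X id = Y := by
  have hYnd : Y.Nodup := hY.imp (fun h => ne_of_lt h)
  exact PySem.List.sorted_eq_of_perm_of_pairwise_lt _ _ _
    ((List.perm_ext_iff_of_nodup hYnd hX).2 (fun a => (h a).symm)) hY

-- inner fold of B's index build: appends g once iff v is in the (duplicate-free) set vs
theorem pv_inner_fold (vs : List String) (g v : String)
    (d : PySem.Dict String (List String)) (hnd : vs.Nodup) :
    (vs.foldl (fun d v' => d.modify v' [] (fun gs => gs ++ [g])) d).getD v []
      = d.getD v [] ++ (if v ∈ vs then [g] else []) := by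
  have hmap : vs.foldl (fun d v' => d.modify v' [] (fun gs => gs ++ [g])) d
      = (vs.map (fun v' => (v', g))).foldl
          (fun d p => d.modify p.1 [] (fun gs => gs ++ [p.2])) d := by
    rw [List.foldl_map]
  rw [hmap, PySem.Dict.getD_foldl_modify_append]
  congr 1
  rw [List.filter_map, List.map_map]
  have : ((fun p => p.1 == v) ∘ fun v' => (v', g)) = (fun v' => v' == v) := rfl
  rw [this, List.filter_beq]
  by_cases hv : v ∈ vs
  · rw [List.count_eq_one_of_mem hnd hv]; simp [hv]
  · rw [List.count_eq_zero_of_not_mem hv]; simp [hv]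

-- B's index at key v collects exactly the genes (in activeGenes order) whose set contains v
theorem pv_val2genes_getD (lookup : String → List String) (l : List String) (v : String)
    (d : PySem.Dict String (List String)) (hnd : ∀ g ∈ l, (lookup g).Nodup) :
    (l.foldl (fun d g => (lookup g).foldl
        (fun d v' => d.modify v' [] (fun gs => gs ++ [g])) d) d).getD v []
      = d.getD v [] ++ l.filter (fun g => (lookup g).contains v) := by
  induction l generalizing d with
  | nil => simp
  | cons a t ih =>
    simp only [List.foldl_cons, List.filter_cons]
    rw [ih _ (fun g hg => hnd g (List.mem_cons_of_mem a hg)),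
        pv_inner_fold (lookup a) a v d (hnd a (List.mem_cons_self))]
    by_cases hv : v ∈ lookup a
    · simp [hv]
    · simp [hv]

-- keys of B's index as a fold of set-updates
theorem pv_val2genes_keys (lookup : String → List String) (l : List String)
    (d : PySem.Dict String (List String)) :
    (l.foldl (fun d g => (lookup g).foldl
        (fun d v' => d.modify v' [] (fun gs => gs ++ [g])) d) d).keys
      = l.foldl (fun s g => PySem.Set.update s (lookup g)) d.keys := by
  induction l generalizing d with
  | nil => rfl
  | cons a t ih =>
    simp only [List.foldl_cons, ih]
    congr 1
    have := PySem.Dict.keys_foldl_modify (lookup a) ([] : List String)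
      (fun _ _ => (fun gs => gs ++ [a])) d
    exact this

-- main equivalence, with the precondition unpacked
theorem pv_main (gene_vals : List (String × List String))
    (hK : (gene_vals.map Prod.fst).Nodup) (hV : ∀ p ∈ gene_vals, p.2.Nodup) :
    format_gene_values_py gene_vals = format_gene_values_py_alt gene_vals := by
  have hFsub : (gene_vals.filter (fun p => !p.2.isEmpty)).Sublist gene_vals :=
    List.filter_sublist
  have hFK : ((gene_vals.filter (fun p => !p.2.isEmpty)).map Prod.fst).Nodup :=
    hK.sublist (hFsub.map Prod.fst)
  simp only [format_gene_values_py, format_gene_values_py_alt]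
  set F := gene_vals.filter (fun p => !p.2.isEmpty) with hFdef
  have hitemsF : (PySem.Dict.ofList F).items = F := pv_items_ofList F hFK
  have hvalsF : (PySem.Dict.ofList F).values = F.map (fun x => x.2) := by
    simp only [PySem.Dict.values, hitemsF]
  have hkeysF : (PySem.Dict.ofList F).keys = F.map (fun x => x.1) := by
    simp only [PySem.Dict.keys, hitemsF]
  by_cases hFnil : F = []
  · rw [if_pos (show ((PySem.Dict.ofList F).items.isEmpty = true) by rw [hitemsF, hFnil]; rfl),
        if_pos (show ((PySem.List.sorted (F.map (fun x => x.1)) id).isEmpty = true) by rw [hFnil]; rfl)]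
  -- F nonempty from here on
  simp only [hitemsF, hvalsF, hkeysF]
  have hFV : ∀ p ∈ F, p.2.Nodup := fun p hp => hV p (hFsub.subset hp)
  have hFne : ∀ p ∈ F, p.2 ≠ [] := by
    intro p hp
    have := List.mem_filter.1 (hFdef ▸ hp)
    simpa using this.2
  have hlook : ∀ p ∈ F, (PySem.Dict.ofList gene_vals).getD p.1 [] = p.2 :=
    fun p hp => pv_getD_ofList gene_vals p.1 p.2 [] hK (hFsub.subset hp)
  set AG := PySem.List.sorted (F.map (fun x => x.1)) id with hAGdef
  have hAGperm : AG.Perm (F.map (fun x => x.1)) := PySem.List.sorted_perm _ _ _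
  have hAGnd : AG.Nodup := hAGperm.nodup_iff.2 hFK
  have hAGlt : AG.Pairwise (· < ·) := by
    have hle : AG.Pairwise (fun a b => id a ≤ id b) := by
      rw [hAGdef]; exact PySem.List.sorted_pairwise (F.map (fun x => x.1)) id
    exact (hle.and hAGnd).imp (fun h => lt_of_le_of_ne h.1 h.2)
  have hAGne : AG ≠ [] := by
    intro h
    rw [h] at hAGperm
    exact hFnil (List.map_eq_nil_iff.1 hAGperm.symm.eq_nil)
  -- correspondence between genes in AG and the pairs of F
  have hgchar : ∀ (v g : String),
      (g ∈ AG ∧ v ∈ (PySem.Dict.ofList gene_vals).getD g []) ↔ ∃ p ∈ F, p.1 = g ∧ v ∈ p.2 := by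
    intro v g
    constructor
    · rintro ⟨hg, hv⟩
      obtain ⟨p, hp, rfl⟩ := List.mem_map.1 (hAGperm.mem_iff.1 hg)
      rw [hlook p hp] at hv
      exact ⟨p, hp, rfl, hv⟩
    · rintro ⟨p, hp, rfl, hv⟩
      refine ⟨hAGperm.mem_iff.2 (List.mem_map_of_mem hp), ?_⟩
      rw [hlook p hp]; exact hv
  have hlookNd : ∀ g ∈ AG, ((PySem.Dict.ofList gene_vals).getD g []).Nodup := by
    intro g hg
    obtain ⟨p, hp, rfl⟩ := List.mem_map.1 (hAGperm.mem_iff.1 hg)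
    rw [hlook p hp]; exact hFV p hp
  set allV := List.foldl (fun s vs => PySem.Set.update s vs) PySem.Set.empty
      (F.map (fun x => x.2)) with hallVdef
  have hmemAll : ∀ y, y ∈ allV ↔ ∃ p ∈ F, y ∈ p.2 := by
    intro y
    rw [hallVdef, pv_mem_foldl_update (fun vs => vs)]
    simp only [PySem.Set.empty, List.not_mem_nil, false_or, List.mem_map]
    constructor
    · rintro ⟨x, ⟨p, hp, rfl⟩, hy⟩
      exact ⟨p, hp, hy⟩
    · rintro ⟨p, hp, hy⟩
      exact ⟨p.2, ⟨p, hp, rfl⟩, hy⟩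
  have hAllnd : allV.Nodup := by
    rw [hallVdef]; exact pv_nodup_foldl_update _ _ _ List.nodup_nil
  have hallVne : allV ≠ [] := by
    obtain ⟨p, hp⟩ := List.exists_mem_of_ne_nil F hFnil
    obtain ⟨y, hy⟩ := List.exists_mem_of_ne_nil p.2 (hFne p hp)
    exact List.ne_nil_of_mem ((hmemAll y).2 ⟨p, hp, hy⟩)
  set V2 := List.foldl (fun d g =>
      List.foldl (fun d v => d.modify v [] fun gs => gs ++ [g]) d
        ((PySem.Dict.ofList gene_vals).getD g [])) PySem.Dict.empty AG with hV2def
  have hkeysV2 : V2.keys = List.foldl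
      (fun s g => PySem.Set.update s ((PySem.Dict.ofList gene_vals).getD g [])) [] AG := by
    rw [hV2def]
    have := pv_val2genes_keys (fun g => (PySem.Dict.ofList gene_vals).getD g []) AG
      PySem.Dict.empty
    simpa [PySem.Dict.empty, PySem.Dict.keys] using this
  have hmemKV : ∀ y, y ∈ V2.keys ↔ ∃ p ∈ F, y ∈ p.2 := by
    intro y
    rw [hkeysV2, pv_mem_foldl_update (fun g => (PySem.Dict.ofList gene_vals).getD g [])]
    simp only [List.not_mem_nil, false_or]
    constructor
    · rintro ⟨g, hg, hy⟩
      exact (hgchar y g).1 ⟨hg, hy⟩ |>.imp (fun p hp => ⟨hp.1, hp.2.2⟩)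
    · rintro ⟨p, hp, hy⟩
      exact ⟨p.1, ((hgchar y p.1).2 ⟨p, hp, rfl, hy⟩).1, ((hgchar y p.1).2 ⟨p, hp, rfl, hy⟩).2⟩
  have hKVnd : V2.keys.Nodup := by
    rw [hkeysV2]; exact pv_nodup_foldl_update _ _ _ List.nodup_nil
  have hsortedEq : PySem.List.sorted allV id = PySem.List.sorted V2.keys id :=
    pv_sorted_congr _ _ hAllnd hKVnd (fun a => (hmemAll a).trans (hmemKV a).symm)
  have hgs : ∀ v, V2.getD v []
      = AG.filter (fun g => ((PySem.Dict.ofList gene_vals).getD g []).contains v) := by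
    intro v
    rw [hV2def]
    have := pv_val2genes_getD (fun g => (PySem.Dict.ofList gene_vals).getD g []) AG v
      PySem.Dict.empty hlookNd
    simpa [PySem.Dict.getD_empty] using this
  -- A's per-value gene list equals B's stored one
  have hgsA : ∀ v, PySem.List.sorted ((F.filter (fun p => p.2.contains v)).map (fun x => x.1)) id
      = AG.filter (fun g => ((PySem.Dict.ofList gene_vals).getD g []).contains v) := by
    intro v
    apply pv_sorted_eq_of_mem_iff
    · exact hFK.sublist ((List.filter_sublist (l := F)).map _)
    · exact hAGlt.sublist (List.filter_sublist (l := AG))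
    · intro g
      simp only [List.mem_map, List.mem_filter]
      constructor
      · rintro ⟨p, ⟨hpF, hpv⟩, rfl⟩
        have h2 := (hgchar v p.1).2 ⟨p, hpF, rfl, by simpa using hpv⟩
        exact ⟨h2.1, by simpa using h2.2⟩
      · rintro ⟨hg, hcont⟩
        obtain ⟨p, hp, rfl, hv⟩ := (hgchar v g).1 ⟨hg, by simpa using hcont⟩
        exact ⟨p, ⟨hp, by simpa using hv⟩, rfl⟩
  -- A's set-equality test is B's length test
  have hcond : ∀ v,
      PySem.Set.equal
        (PySem.Set.ofList (AG.filter (fun g => ((PySem.Dict.ofList gene_vals).getD g []).contains v)))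
        (PySem.Set.ofList (F.map (fun x => x.1)))
      = ((AG.filter (fun g => ((PySem.Dict.ofList gene_vals).getD g []).contains v)).length
          == AG.length) := by
    intro v
    rw [Bool.eq_iff_iff, beq_iff_eq]
    constructor
    · intro h
      have hmem := (PySem.Set.equal_iff _ _).1 h
      simp only [PySem.Set.mem_ofList] at hmem
      have hperm : (AG.filter _).Perm (F.map (fun x => x.1)) :=
        (List.perm_ext_iff_of_nodup (hAGnd.filter _) hFK).2 hmem
      rw [hperm.length_eq, hAGperm.length_eq]
    · intro h
      have hall : ∀ g ∈ AG,
          ((PySem.Dict.ofList gene_vals).getD g []).contains v = true :=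
        List.length_filter_eq_length_iff.1 h
      rw [List.filter_eq_self.mpr hall]
      apply (PySem.Set.equal_iff _ _).2
      intro x
      simp only [PySem.Set.mem_ofList]
      exact hAGperm.mem_iff
  -- condition for a value contained in every active set
  have hcondAll : ∀ v, (∀ p ∈ F, v ∈ p.2) →
      ((V2.getD v []).length == AG.length) = true := by
    intro v hvall
    rw [hgs v, beq_iff_eq]
    congr 1
    apply List.filter_eq_self.mpr
    intro g hg
    obtain ⟨p, hp, rfl⟩ := List.mem_map.1 (hAGperm.mem_iff.1 hg)
    rw [hlook p hp]
    simpa using hvall p hp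
  -- B's side in map form
  have hB : (if AG.isEmpty = true then "" else
      PySem.Str.join ";" (List.foldl (fun parts v => parts ++
        [if ((V2.getD v []).length == AG.length) = true then v
         else PySem.Str.join "," (V2.getD v []) ++ ":" ++ v]) [] (PySem.List.sorted V2.keys id)))
      = PySem.Str.join ";" ((PySem.List.sorted V2.keys id).map
          (fun v => if ((V2.getD v []).length == AG.length) = true then v
            else PySem.Str.join "," (V2.getD v []) ++ ":" ++ v)) := by
    rw [if_neg (by simp [hAGne]), PySem.List.foldl_append_singleton_eq_map, List.nil_append]
  rw [if_neg (by simp [hFnil]), if_neg (by simp [hallVne]), hB]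
  split_ifs with h1 h2
  · -- a single value overall
    obtain ⟨w, hw⟩ := List.length_eq_one_iff.1 (by simpa using h1)
    have hwmem : ∀ y, (∃ p ∈ F, y ∈ p.2) ↔ y = w := by
      intro y
      rw [← hmemAll y, hw]; simp
    have hKVw : PySem.List.sorted V2.keys id = [w] := by
      apply pv_sorted_eq_of_mem_iff _ _ hKVnd (List.pairwise_singleton _ _)
      intro a
      rw [hmemKV a, hwmem a]; simp
    have hwAll : ∀ p ∈ F, w ∈ p.2 := by
      intro p hp
      obtain ⟨y, hy⟩ := List.exists_mem_of_ne_nil p.2 (hFne p hp)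
      have : y = w := (hwmem y).1 ⟨p, hp, hy⟩
      rwa [this] at hy
    rw [hKVw]
    simp only [List.map_cons, List.map_nil, if_pos (hcondAll w hwAll)]
    rw [hw]
    simp [PySem.Str.join]
  · -- all active sets equal
    obtain ⟨q, F', hqF⟩ := List.exists_cons_of_ne_nil hFnil
    have hq : q ∈ F := hqF ▸ List.mem_cons_self
    have hvs0 : PySem.List.pyGetD (F.map (fun x => x.2)) 0 [] = q.2 := by
      rw [hqF]; simp [pysem]
    rw [hvs0] at h2 ⊢
    have h2all : ∀ p ∈ F, PySem.Set.equal p.2 q.2 = true := by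
      intro p hp
      have := List.all_eq_true.1 h2 p.2 (List.mem_map_of_mem hp)
      simpa using this
    have hmemvs0 : ∀ y, y ∈ q.2 ↔ ∃ p ∈ F, y ∈ p.2 := by
      intro y
      constructor
      · intro hy; exact ⟨q, hq, hy⟩
      · rintro ⟨p, hp, hy⟩
        exact ((PySem.Set.equal_iff _ _).1 (h2all p hp) y).1 hy
    have hsq : PySem.List.sorted q.2 id = PySem.List.sorted V2.keys id :=
      pv_sorted_congr _ _ (hFV q hq) hKVnd (fun a => (hmemvs0 a).trans (hmemKV a).symm)
    rw [hsq]
    have : ∀ v ∈ PySem.List.sorted V2.keys id,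
        (if ((V2.getD v []).length == AG.length) = true then v
         else PySem.Str.join "," (V2.getD v []) ++ ":" ++ v) = v := by
      intro v hv
      have hvK : v ∈ V2.keys := ((PySem.List.sorted_perm V2.keys id false).mem_iff).1 hv
      obtain ⟨p, hp, hvp⟩ := (hmemKV v).1 hvK
      have hvq : v ∈ q.2 := (hmemvs0 v).2 ⟨p, hp, hvp⟩
      have hvall : ∀ p' ∈ F, v ∈ p'.2 := by
        intro p' hp'
        exact ((PySem.Set.equal_iff _ _).1 (h2all p' hp') v).2 hvq
      rw [if_pos (hcondAll v hvall)]
    rw [List.map_congr_left this, List.map_id']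
  · -- general branch
    have hbody : ∀ (acc : List String) (val : String),
        (if PySem.Set.equal (PySem.Set.ofList
              (PySem.List.sorted ((F.filter (fun p => p.2.contains val)).map (fun x => x.1)) id))
            (PySem.Set.ofList (F.map (fun x => x.1))) = true
         then acc ++ [val]
         else acc ++ [PySem.Str.join ","
            (PySem.List.sorted ((F.filter (fun p => p.2.contains val)).map (fun x => x.1)) id)
            ++ ":" ++ val])
        = acc ++ [if ((V2.getD val []).length == AG.length) = true then val
            else PySem.Str.join "," (V2.getD val []) ++ ":" ++ val] := by
      intro acc val
      rw [hgsA val, hcond val, ← hgs val]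
      split <;> rfl
    rw [hsortedEq,
      PySem.List.foldl_congr_mem (PySem.List.sorted V2.keys id) _
        (fun (parts : List String) (val : String) => parts ++
          [if ((V2.getD val []).length == AG.length) = true then val
           else PySem.Str.join "," (V2.getD val []) ++ ":" ++ val])
        [] (fun acc x _ => hbody acc x),
      PySem.List.foldl_append_singleton_eq_map, List.nil_append]

-- ===== VERDICT (by name: the statement is the Claim_ definition above) =====
theorem format_gene_values_py_spec : Claim_equal_format_gene_values_py := by
  intro gene_vals _ hPre
  exact pv_main gene_vals hPre.1 hPre.2
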